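-- pv_equiv track=rewrite | github.com/DieterJoubert/Rosalind_solutions | stronghold/prob_edit.py | get_edit_distance_matrix
-- ===== SOURCE A (Python) =====
-- def get_edit_distance_matrix(s, t):
--     matrix = [[0 for _ in range(len(t)+1)] for _ in range(len(s)+1)]
--
--     for s_idx in range(len(s)+1):
--         matrix[s_idx][0] = s_idx
--     for t_idx in range(len(t)+1):
--         matrix[0][t_idx] = t_idx
--
--     for s_idx in range(1, len(s)+1):
--         for t_idx in range(1, len(t)+1):
--             if s[s_idx-1] == t[t_idx-1]:
--                 matrix[s_idx][t_idx] = matrix[s_idx-1][t_idx-1]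
--             else:
--                 matrix[s_idx][t_idx] = 1 + min(matrix[s_idx-1][t_idx-1], matrix[s_idx][t_idx-1], matrix[s_idx-1][t_idx])
--
--     return matrix
-- ===== SOURCE B (Python) =====
-- def get_edit_distance_matrix(s, t):
--     memo = {}
--     def edit(i, j):
--         if (i, j) in memo:
--             return memo[(i, j)]
--         if i == 0:
--             v = j
--         elif j == 0:
--             v = i
--         elif s[i-1] == t[j-1]:
--             v = edit(i-1, j-1)
--         else:
--             v = 1 + min(edit(i-1, j-1), edit(i, j-1), edit(i-1, j))
--         memo[(i, j)] = v
--         return v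
--     return [[edit(i, j) for j in range(len(t)+1)] for i in range(len(s)+1)]
-- ===== Notes on version B (the rewrite author's own statement) =====
-- stated objective: alternative
-- what changed: Replaces A's bottom-up double loop mutating a preallocated matrix by top-down memoized recursion: a helper edit(i,j) computes the prefix edit distance recursively, caching results in a dict, and the matrix is produced by a comprehension over all (i,j).
import Mathlib
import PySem

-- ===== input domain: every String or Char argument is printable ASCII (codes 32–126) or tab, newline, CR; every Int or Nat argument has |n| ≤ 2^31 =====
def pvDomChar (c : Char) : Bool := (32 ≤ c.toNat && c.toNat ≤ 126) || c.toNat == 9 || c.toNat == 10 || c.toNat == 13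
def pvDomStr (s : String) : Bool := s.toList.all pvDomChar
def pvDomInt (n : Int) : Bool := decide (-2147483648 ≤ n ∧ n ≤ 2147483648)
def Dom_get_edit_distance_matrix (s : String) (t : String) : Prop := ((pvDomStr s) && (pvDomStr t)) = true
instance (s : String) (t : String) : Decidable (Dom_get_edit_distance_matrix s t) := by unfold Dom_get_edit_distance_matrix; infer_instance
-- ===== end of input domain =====

-- B replaces A's bottom-up double loop over a preallocated mutated matrix by top-down
-- memoized recursion (edit(i,j) with a dict cache), a different decomposition of the same DP.

-- ===== PORT A =====
-- matrix[i][j] read (all A's indices are in range)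
def pvMget (mat : List (List Int)) (i j : Nat) : Int := (mat.getD i []).getD j 0
-- matrix[i][j] = v write
def pvMset (mat : List (List Int)) (i j : Nat) (v : Int) : List (List Int) :=
  mat.set i ((mat.getD i []).set j v)

def get_edit_distance_matrix (s : String) (t : String) : List (List Int) :=
  let sl := s.toList
  let tl := t.toList
  let n := sl.length
  let m := tl.length
  let matrix0 : List (List Int) := List.replicate (n+1) (List.replicate (m+1) 0)
  let matrix1 := (List.range (n+1)).foldl (fun mat i => pvMset mat i 0 (i : Int)) matrix0
  let matrix2 := (List.range (m+1)).foldl (fun mat j => pvMset mat 0 j (j : Int)) matrix1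
  (List.range' 1 n).foldl (fun mat i =>
    (List.range' 1 m).foldl (fun mat j =>
      if sl.getD (i-1) ' ' == tl.getD (j-1) ' ' then
        pvMset mat i j (pvMget mat (i-1) (j-1))
      else
        pvMset mat i j
          (1 + min (pvMget mat (i-1) (j-1)) (min (pvMget mat i (j-1)) (pvMget mat (i-1) j))))
      mat) matrix2

-- ===== PORT B =====
-- edit(i, j): memoized recursion, threading the memo dict; returns (value, memo)
def pvEdit (sl tl : List Char) (i j : Nat) (memo : PySem.Dict (Nat × Nat) Int) :
    Int × PySem.Dict (Nat × Nat) Int :=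
  match memo.get? (i, j) with
  | some v => (v, memo)
  | none =>
    if hi : i = 0 then ((j : Int), memo.insert (i, j) (j : Int))
    else if hj : j = 0 then ((i : Int), memo.insert (i, j) (i : Int))
    else if sl.getD (i-1) ' ' == tl.getD (j-1) ' ' then
      let r := pvEdit sl tl (i-1) (j-1) memo
      (r.1, r.2.insert (i, j) r.1)
    else
      let r1 := pvEdit sl tl (i-1) (j-1) memo
      let r2 := pvEdit sl tl i (j-1) r1.2
      let r3 := pvEdit sl tl (i-1) j r2.2
      let v := 1 + min r1.1 (min r2.1 r3.1)
      (v, r3.2.insert (i, j) v)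
  termination_by (i, j)

def get_edit_distance_matrix_alt (s : String) (t : String) : List (List Int) :=
  let sl := s.toList
  let tl := t.toList
  ((List.range (sl.length+1)).foldl
    (fun (st : List (List Int) × PySem.Dict (Nat × Nat) Int) i =>
      let row := (List.range (tl.length+1)).foldl
        (fun (st2 : List Int × PySem.Dict (Nat × Nat) Int) j =>
          let e := pvEdit sl tl i j st2.2
          (st2.1 ++ [e.1], e.2)) ([], st.2)
      (st.1 ++ [row.1], row.2))
    ([], PySem.Dict.empty)).1

-- ===== PRECONDITION & SPEC =====
def Spec_get_edit_distance_matrix (s : String) (t : String) (out : List (List Int)) : Prop := out = get_edit_distance_matrix_alt s t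
instance (s : String) (t : String) (out : List (List Int)) : Decidable (Spec_get_edit_distance_matrix s t out) := by unfold Spec_get_edit_distance_matrix; infer_instance

-- ===== CLAIM (what is proved, stated in full; the proofs are below) =====
def Claim_equal_get_edit_distance_matrix : Prop := ∀ (s : String) (t : String), Dom_get_edit_distance_matrix s t → Spec_get_edit_distance_matrix s t (get_edit_distance_matrix s t)

-- ===== LEMMAS AND PROOFS =====

-- pure prefix edit distance (the common functional description of both programs)
def pvEd (sl tl : List Char) (i j : Nat) : Int :=
  if hi : i = 0 then (j : Int)
  else if hj : j = 0 then (i : Int)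
  else if sl.getD (i-1) ' ' == tl.getD (j-1) ' ' then pvEd sl tl (i-1) (j-1)
  else 1 + min (pvEd sl tl (i-1) (j-1)) (min (pvEd sl tl i (j-1)) (pvEd sl tl (i-1) j))
  termination_by (i, j)

-- row-streaming description of A's loops
def pvNextRowGo (c : Char) (prev : List Int) : List (Char × Nat) → Int → List Int
  | [], _ => []
  | (d, j) :: rest, left =>
    let v := if c == d then prev.getD (j-1) 0
             else 1 + min (prev.getD (j-1) 0) (min left (prev.getD j 0))
    v :: pvNextRowGo c prev rest v

def pvNextRow (c : Char) (prev : List Int) (tl : List Char) (i : Int) : List Int :=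
  i :: pvNextRowGo c prev (tl.zipIdx 1) i

def pvBuild (tl : List Char) : List Char → Nat → List Int → List (List Int)
  | [], _, prev => [prev]
  | c :: cs, i, prev => prev :: pvBuild tl cs (i+1) (pvNextRow c prev tl (i : Int))

theorem pv_getD_append_len {α : Type} (l1 : List α) (x : α) (l2 : List α) (d : α) :
    (l1 ++ x :: l2).getD l1.length d = x := by
  simp [List.getD]

theorem pv_getD_append_lt {α : Type} (l1 l2 : List α) (i : Nat) (h : i < l1.length) (d : α) :
    (l1 ++ l2).getD i d = l1.getD i d := by
  simp [List.getD, List.getElem?_append_left h]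

theorem pv_set_append_len {α : Type} (l1 : List α) (x : α) (l2 : List α) (y : α) :
    (l1 ++ x :: l2).set l1.length y = l1 ++ y :: l2 := by
  induction l1 with
  | nil => simp
  | cons a l ih => simp [ih]

theorem pv_drop_getD {α : Type} (l : List α) (k : Nat) (x : α) (r : List α)
    (h : l.drop k = x :: r) (d : α) : l.getD k d = x := by
  have h0 : (l.drop k).getD 0 d = x := by rw [h]; rfl
  rw [← h0]
  simp [List.getD, List.getElem?_drop]

-- first init loop: matrix[i][0] = i
theorem pv_init1 (m : Nat) :
    ∀ (k a : Nat) (done : List (List Int)), done.length = a →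
    (List.range' a k).foldl (fun mat i => pvMset mat i 0 (i : Int))
        (done ++ List.replicate k (List.replicate (m+1) 0))
      = done ++ (List.range' a k).map (fun i : Nat => ((i : Int) :: List.replicate m 0)) := by
  intro k
  induction k with
  | zero => intro a done _; simp
  | succ k ih =>
    intro a done hd
    rw [List.range'_succ, List.replicate_succ]
    have hstep : pvMset (done ++ List.replicate (m+1) 0 :: List.replicate k (List.replicate (m+1) 0)) a 0 (a : Int)
        = done ++ ((a : Int) :: List.replicate m 0) :: List.replicate k (List.replicate (m+1) 0) := by
      unfold pvMset
      rw [← hd, pv_getD_append_len, pv_set_append_len]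
      simp [List.replicate_succ]
    simp only [List.foldl_cons, hstep]
    have := ih (a+1) (done ++ [(a : Int) :: List.replicate m 0]) (by simp [hd])
    simp only [List.append_assoc] at this ⊢
    simpa using this

-- second init loop: row 0 becomes [0,1,…,m]
theorem pv_init2 :
    ∀ (k a : Nat) (r : List Int) (rest : List (List Int)), r.length = a →
    (List.range' a k).foldl (fun mat j => pvMset mat 0 j (j : Int))
        ((r ++ List.replicate k 0) :: rest)
      = (r ++ (List.range' a k).map (fun j : Nat => (j : Int))) :: rest := by
  intro k
  induction k with
  | zero => intro a r rest _; simp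
  | succ k ih =>
    intro a r rest hr
    rw [List.range'_succ, List.replicate_succ]
    have hstep : pvMset ((r ++ (0 : Int) :: List.replicate k 0) :: rest) 0 a (a : Int)
        = ((r ++ (a : Int) :: List.replicate k 0) :: rest) := by
      unfold pvMset
      simp only [List.getD, List.getElem?_cons_zero, Option.getD_some, List.set_cons_zero]
      rw [← hr, pv_set_append_len]
    simp only [List.foldl_cons, hstep]
    have := ih (a+1) (r ++ [(a : Int)]) rest (by simp [hr])
    simp only [List.append_assoc] at this ⊢
    simpa using this

-- inner loop of A fills row i exactly to prev row ++ pvNextRowGo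
theorem pv_inner (sl tl : List Char) (c : Char) (done rest : List (List Int)) (prev : List Int)
    (hsc : sl.getD done.length ' ' = c) :
    ∀ (ds : List Char) (j0 : Nat) (rowpre : List Int) (left : Int),
      tl.drop j0 = ds → rowpre.length = j0 + 1 → rowpre.getD j0 0 = left →
    (List.range' (j0+1) ds.length).foldl (fun mat j =>
        if sl.getD (done.length + 1 - 1) ' ' == tl.getD (j-1) ' ' then
          pvMset mat (done.length+1) j (pvMget mat (done.length+1-1) (j-1))
        else
          pvMset mat (done.length+1) j
            (1 + min (pvMget mat (done.length+1-1) (j-1))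
                 (min (pvMget mat (done.length+1) (j-1)) (pvMget mat (done.length+1-1) j))))
        (done ++ prev :: (rowpre ++ List.replicate ds.length 0) :: rest)
      = done ++ prev :: (rowpre ++ pvNextRowGo c prev (ds.zipIdx (j0+1)) left) :: rest := by
  intro ds
  induction ds with
  | nil => intro j0 rowpre left _ _ _; simp [pvNextRowGo]
  | cons d ds ih =>
    intro j0 rowpre left hdrop hlen hleft
    have htd : tl.getD j0 ' ' = d := pv_drop_getD tl j0 d ds hdrop ' '
    have hprevrow : ∀ (X : List Int) (R : List (List Int)),
        (done ++ prev :: X :: R).getD done.length [] = prev := fun X R => by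
      simpa using pv_getD_append_len done prev (X :: R) []
    have hcurrow : ∀ (X : List Int) (R : List (List Int)),
        (done ++ prev :: X :: R).getD (done.length + 1) [] = X := fun X R => by
      have := pv_getD_append_len (done ++ [prev]) X R []
      simpa [List.append_assoc] using this
    have hrowpre_last : (rowpre ++ (0:Int) :: List.replicate ds.length 0).getD j0 0 = left := by
      rw [pv_getD_append_lt _ _ j0 (by omega) 0, hleft]
    have hwrite : ∀ (v : Int),
        (rowpre ++ (0:Int) :: List.replicate ds.length 0).set (j0+1) v
          = (rowpre ++ [v]) ++ List.replicate ds.length 0 := by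
      intro v
      have := pv_set_append_len rowpre (0:Int) (List.replicate ds.length 0) v
      rw [← hlen]
      simpa [List.append_assoc] using this
    have hsetrow : ∀ (X Y : List Int) (R : List (List Int)),
        (done ++ prev :: X :: R).set (done.length + 1) Y = done ++ prev :: Y :: R := by
      intro X Y R
      have := pv_set_append_len (done ++ [prev]) X R Y
      simpa [List.append_assoc] using this
    set v : Int := if c == d then prev.getD j0 0
        else 1 + min (prev.getD j0 0) (min left (prev.getD (j0+1) 0)) with hv
    have hstep :
        (if sl.getD (done.length + 1 - 1) ' ' == tl.getD ((j0+1)-1) ' ' then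
          pvMset (done ++ prev :: (rowpre ++ (0:Int) :: List.replicate ds.length 0) :: rest)
            (done.length+1) (j0+1)
            (pvMget (done ++ prev :: (rowpre ++ (0:Int) :: List.replicate ds.length 0) :: rest)
              (done.length+1-1) ((j0+1)-1))
        else
          pvMset (done ++ prev :: (rowpre ++ (0:Int) :: List.replicate ds.length 0) :: rest)
            (done.length+1) (j0+1)
            (1 + min (pvMget (done ++ prev :: (rowpre ++ (0:Int) :: List.replicate ds.length 0) :: rest) (done.length+1-1) ((j0+1)-1))
                 (min (pvMget (done ++ prev :: (rowpre ++ (0:Int) :: List.replicate ds.length 0) :: rest) (done.length+1) ((j0+1)-1))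
                      (pvMget (done ++ prev :: (rowpre ++ (0:Int) :: List.replicate ds.length 0) :: rest) (done.length+1-1) (j0+1)))))
        = done ++ prev :: ((rowpre ++ [v]) ++ List.replicate ds.length 0) :: rest := by
      unfold pvMset pvMget
      simp only [Nat.add_sub_cancel, hsc, htd, hprevrow, hcurrow, hrowpre_last, hv]
      by_cases hc : c == d
      · simp [hc, hwrite, hsetrow]
      · simp [hc, hwrite, hsetrow]
    simp only [List.length_cons, List.range'_succ, List.replicate_succ, List.foldl_cons]
    rw [hstep]
    rw [ih (j0+1) (rowpre ++ [v]) v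
          (by rw [← List.drop_drop]; rw [hdrop]; rfl)
          (by simp [hlen])
          (by simpa [← hlen] using pv_getD_append_len rowpre v [] 0)]
    simp [List.zipIdx_cons, pvNextRowGo, hv]

theorem pv_nextRowGo_length (c : Char) (prev : List Int) :
    ∀ (l : List (Char × Nat)) (left : Int), (pvNextRowGo c prev l left).length = l.length := by
  intro l
  induction l with
  | nil => intro left; rfl
  | cons p rest ih => intro left; obtain ⟨d, j⟩ := p; simp [pvNextRowGo, ih]

theorem pv_nextRow_length (c : Char) (prev : List Int) (tl : List Char) (i : Int) :
    (pvNextRow c prev tl i).length = tl.length + 1 := by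
  simp [pvNextRow, pv_nextRowGo_length]

-- outer loop of A builds pvBuild
theorem pv_outer (sl tl : List Char) :
    ∀ (cs : List Char) (done : List (List Int)) (prev : List Int),
      sl.drop done.length = cs → prev.length = tl.length + 1 →
    (List.range' (done.length+1) cs.length).foldl (fun mat i =>
        (List.range' 1 tl.length).foldl (fun mat j =>
          if sl.getD (i-1) ' ' == tl.getD (j-1) ' ' then
            pvMset mat i j (pvMget mat (i-1) (j-1))
          else
            pvMset mat i j
              (1 + min (pvMget mat (i-1) (j-1))
                   (min (pvMget mat i (j-1)) (pvMget mat (i-1) j)))) mat)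
        (done ++ prev :: (List.range' (done.length+1) cs.length).map
            (fun i : Nat => ((i : Int) :: List.replicate tl.length 0)))
      = done ++ pvBuild tl cs (done.length+1) prev := by
  intro cs
  induction cs with
  | nil => intro done prev _ _; simp [pvBuild]
  | cons c cs ih =>
    intro done prev hdrop hp
    have hsc : sl.getD done.length ' ' = c := pv_drop_getD sl done.length c cs hdrop ' '
    simp only [List.length_cons]
    rw [List.range'_succ]
    simp only [List.map_cons, List.foldl_cons]
    have hinner := pv_inner sl tl c done
        ((List.range' (done.length+1+1) cs.length).map (fun i : Nat => ((i : Int) :: List.replicate tl.length 0)))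
        prev hsc tl 0 [((done.length+1 : Nat) : Int)] ((done.length+1 : Nat) : Int)
        (by simp) (by simp) (by simp [List.getD])
    simp only [List.drop_zero] at hinner
    have hfix : ((((done.length+1 : Nat) : Int)) :: List.replicate tl.length (0:Int))
        = [((done.length+1 : Nat) : Int)] ++ List.replicate tl.length 0 := by simp
    rw [hfix]
    rw [show (0:Nat)+1 = 1 from rfl] at hinner
    rw [hinner]
    have hnr : ([((done.length+1 : Nat) : Int)] ++ pvNextRowGo c prev (tl.zipIdx 1) ((done.length+1 : Nat) : Int))
        = pvNextRow c prev tl ((done.length+1 : Nat) : Int) := by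
      simp [pvNextRow]
    rw [hnr]
    have := ih (done ++ [prev]) (pvNextRow c prev tl ((done.length+1 : Nat) : Int))
      (by simpa using congrArg (List.drop 1) hdrop)
      (pv_nextRow_length c prev tl _)
    simp only [List.length_append, List.length_cons, List.length_nil, Nat.add_zero] at this
    simp only [pvBuild]
    simp only [List.append_assoc, List.cons_append, List.nil_append] at this ⊢
    exact this

-- ===== A-side: pvBuild rows are the pvEd table =====

theorem pv_map_range_getD (f : Nat → Int) (n k : Nat) (h : k < n) :
    ((List.range n).map f).getD k 0 = f k := by
  simp [List.getD, List.getElem?_range, h]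

theorem pvEd_zero (sl tl : List Char) (j : Nat) : pvEd sl tl 0 j = (j : Int) := by
  unfold pvEd; simp

theorem pv_nextRowGo_ed (sl tl : List Char) (i0 : Nat)
    (hc : sl.getD i0 ' ' = sl.getD i0 ' ') :
    ∀ (ds : List Char) (j0 : Nat), tl.drop j0 = ds → j0 + ds.length = tl.length →
    pvNextRowGo (sl.getD i0 ' ') ((List.range (tl.length+1)).map (pvEd sl tl i0))
        (ds.zipIdx (j0+1)) (pvEd sl tl (i0+1) j0)
      = (List.range' (j0+1) ds.length).map (pvEd sl tl (i0+1)) := by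
  intro ds
  induction ds with
  | nil => intro j0 _ _; simp [pvNextRowGo]
  | cons d ds ih =>
    intro j0 hdrop hlen
    have htd : tl.getD j0 ' ' = d := pv_drop_getD tl j0 d ds hdrop ' '
    have hj0 : j0 < tl.length := by simp at hlen; omega
    rw [List.zipIdx_cons]
    simp only [pvNextRowGo, Nat.add_sub_cancel]
    have hget1 : ((List.range (tl.length+1)).map (pvEd sl tl i0)).getD j0 0 = pvEd sl tl i0 j0 :=
      pv_map_range_getD _ _ _ (by omega)
    have hget2 : ((List.range (tl.length+1)).map (pvEd sl tl i0)).getD (j0+1) 0 = pvEd sl tl i0 (j0+1) :=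
      pv_map_range_getD _ _ _ (by omega)
    have hv : (if sl.getD i0 ' ' == d then ((List.range (tl.length+1)).map (pvEd sl tl i0)).getD j0 0
          else 1 + min (((List.range (tl.length+1)).map (pvEd sl tl i0)).getD j0 0)
              (min (pvEd sl tl (i0+1) j0) (((List.range (tl.length+1)).map (pvEd sl tl i0)).getD (j0+1) 0)))
        = pvEd sl tl (i0+1) (j0+1) := by
      rw [hget1, hget2]
      conv_rhs => rw [pvEd]
      simp only [Nat.add_sub_cancel, htd]
      split <;> rfl
    rw [hv]
    rw [ih (j0+1) (by rw [← List.drop_drop]; rw [hdrop]; rfl) (by simp at hlen ⊢; omega)]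
    simp only [List.length_cons]
    rw [List.range'_succ, List.map_cons]

theorem pv_nextRow_ed (sl tl : List Char) (i0 : Nat) :
    pvNextRow (sl.getD i0 ' ') ((List.range (tl.length+1)).map (pvEd sl tl i0)) tl ((i0+1 : Nat) : Int)
      = (List.range (tl.length+1)).map (pvEd sl tl (i0+1)) := by
  unfold pvNextRow
  have h0 : ((i0+1 : Nat) : Int) = pvEd sl tl (i0+1) 0 := by
    rw [pvEd]; simp
  rw [show tl.zipIdx 1 = tl.zipIdx (0+1) from rfl]
  conv_lhs => rw [h0]
  rw [pv_nextRowGo_ed sl tl i0 rfl tl 0 (by simp) (by simp)]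
  rw [List.range_eq_range', List.range'_succ]
  simp [← h0]

theorem pv_build_ed (sl tl : List Char) :
    ∀ (cs : List Char) (i0 : Nat), sl.drop i0 = cs →
    pvBuild tl cs (i0+1) ((List.range (tl.length+1)).map (pvEd sl tl i0))
      = (List.range' i0 (cs.length+1)).map (fun i => (List.range (tl.length+1)).map (pvEd sl tl i)) := by
  intro cs
  induction cs with
  | nil => intro i0 _; simp [pvBuild]
  | cons c cs ih =>
    intro i0 hdrop
    have hsc : sl.getD i0 ' ' = c := pv_drop_getD sl i0 c cs hdrop ' '
    simp only [pvBuild]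
    rw [← hsc, pv_nextRow_ed sl tl i0]
    rw [ih (i0+1) (by rw [← List.drop_drop]; rw [hdrop]; rfl)]
    simp only [List.length_cons]
    conv_rhs => rw [List.range'_succ, List.map_cons, List.range'_succ, List.map_cons]
    conv_lhs => rw [List.range'_succ, List.map_cons]

-- ===== B-side: pvEdit with a correct memo returns pvEd and keeps the memo correct =====

def pvInv (sl tl : List Char) (memo : PySem.Dict (Nat × Nat) Int) : Prop :=
  ∀ p v, memo.get? p = some v → v = pvEd sl tl p.1 p.2

theorem pvInv_insert (sl tl : List Char) (memo : PySem.Dict (Nat × Nat) Int)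
    (h : pvInv sl tl memo) (i j : Nat) (v : Int) (hv : v = pvEd sl tl i j) :
    pvInv sl tl (memo.insert (i, j) v) := by
  intro p w hw
  rw [PySem.Dict.get?_insert] at hw
  split at hw
  · rename_i hp; cases hw; subst hp; exact hv
  · exact h p w hw

theorem pvEdit_spec (sl tl : List Char) :
    ∀ (N i j : Nat) (memo : PySem.Dict (Nat × Nat) Int), i + j ≤ N → pvInv sl tl memo →
    (pvEdit sl tl i j memo).1 = pvEd sl tl i j ∧ pvInv sl tl (pvEdit sl tl i j memo).2 := by
  intro N
  induction N with
  | zero =>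
    intro i j memo hle hinv
    have hi : i = 0 := by omega
    have hj : j = 0 := by omega
    subst hi; subst hj
    rw [pvEdit]
    cases hm : memo.get? (0, 0) with
    | some v =>
      refine ⟨?_, hinv⟩
      have := hinv (0, 0) v hm
      simpa using this
    | none =>
      simp only []
      constructor
      · rw [pvEd]; simp
      · exact pvInv_insert sl tl memo hinv 0 0 _ (by rw [pvEd]; simp)
  | succ N ih =>
    intro i j memo hle hinv
    rw [pvEdit]
    cases hm : memo.get? (i, j) with
    | some v =>
      refine ⟨?_, hinv⟩
      have := hinv (i, j) v hm
      simpa using this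
    | none =>
      by_cases hi : i = 0
      · subst hi
        simp only [dif_pos rfl]
        exact ⟨by rw [pvEd]; simp, pvInv_insert sl tl memo hinv 0 j _ (by rw [pvEd]; simp)⟩
      · by_cases hj : j = 0
        · subst hj
          simp only [dif_neg hi, dif_pos rfl]
          exact ⟨by rw [pvEd]; simp [hi], pvInv_insert sl tl memo hinv i 0 _ (by rw [pvEd]; simp [hi])⟩
        · simp only [dif_neg hi, dif_neg hj]
          by_cases hc : sl.getD (i-1) ' ' == tl.getD (j-1) ' '
          · simp only [if_pos hc]
            obtain ⟨h1v, h1m⟩ := ih (i-1) (j-1) memo (by omega) hinv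
            have heq : pvEd sl tl (i-1) (j-1) = pvEd sl tl i j := by
              conv_rhs => rw [pvEd]
              rw [dif_neg hi, dif_neg hj, if_pos hc]
            exact ⟨by rw [h1v, heq], pvInv_insert sl tl _ h1m i j _ (by rw [h1v, heq])⟩
          · simp only [if_neg hc]
            obtain ⟨h1v, h1m⟩ := ih (i-1) (j-1) memo (by omega) hinv
            obtain ⟨h2v, h2m⟩ := ih i (j-1) _ (by omega) h1m
            obtain ⟨h3v, h3m⟩ := ih (i-1) j _ (by omega) h2m
            have hval : 1 + min (pvEdit sl tl (i-1) (j-1) memo).1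
                (min (pvEdit sl tl i (j-1) (pvEdit sl tl (i-1) (j-1) memo).2).1
                     (pvEdit sl tl (i-1) j (pvEdit sl tl i (j-1) (pvEdit sl tl (i-1) (j-1) memo).2).2).1)
                = pvEd sl tl i j := by
              rw [h1v, h2v, h3v]
              conv_rhs => rw [pvEd]
              rw [dif_neg hi, dif_neg hj, if_neg hc]
            exact ⟨hval, pvInv_insert sl tl _ h3m i j _ hval⟩

theorem pv_inner_fold (sl tl : List Char) (i : Nat) :
    ∀ (js : List Nat) (acc : List Int) (memo : PySem.Dict (Nat × Nat) Int), pvInv sl tl memo →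
    (js.foldl (fun (st2 : List Int × PySem.Dict (Nat × Nat) Int) j =>
        let e := pvEdit sl tl i j st2.2
        (st2.1 ++ [e.1], e.2)) (acc, memo)).1 = acc ++ js.map (pvEd sl tl i)
    ∧ pvInv sl tl (js.foldl (fun (st2 : List Int × PySem.Dict (Nat × Nat) Int) j =>
        let e := pvEdit sl tl i j st2.2
        (st2.1 ++ [e.1], e.2)) (acc, memo)).2 := by
  intro js
  induction js with
  | nil => intro acc memo hinv; exact ⟨by simp, hinv⟩
  | cons j js ih =>
    intro acc memo hinv
    obtain ⟨hv, hm⟩ := pvEdit_spec sl tl (i+j) i j memo (le_refl _) hinv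
    simp only [List.foldl_cons]
    obtain ⟨h1, h2⟩ := ih (acc ++ [(pvEdit sl tl i j memo).1]) (pvEdit sl tl i j memo).2 hm
    refine ⟨?_, h2⟩
    rw [h1, hv]
    simp

theorem pv_outer_fold (sl tl : List Char) :
    ∀ (is : List Nat) (acc : List (List Int)) (memo : PySem.Dict (Nat × Nat) Int), pvInv sl tl memo →
    (is.foldl (fun (st : List (List Int) × PySem.Dict (Nat × Nat) Int) i =>
        let row := (List.range (tl.length+1)).foldl
          (fun (st2 : List Int × PySem.Dict (Nat × Nat) Int) j =>
            let e := pvEdit sl tl i j st2.2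
            (st2.1 ++ [e.1], e.2)) ([], st.2)
        (st.1 ++ [row.1], row.2)) (acc, memo)).1
      = acc ++ is.map (fun i => (List.range (tl.length+1)).map (pvEd sl tl i)) := by
  intro is
  induction is with
  | nil => intro acc memo _; simp
  | cons i is ih =>
    intro acc memo hinv
    obtain ⟨h1, h2⟩ := pv_inner_fold sl tl i (List.range (tl.length+1)) [] memo hinv
    simp only [List.foldl_cons]
    rw [ih _ _ h2, h1]
    simp

theorem pvInv_empty (sl tl : List Char) : pvInv sl tl PySem.Dict.empty := by
  intro p v h
  simp [PySem.Dict.get?_empty] at h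

-- ===== VERDICT (by name: the statement is the Claim_ definition above) =====
theorem get_edit_distance_matrix_spec : Claim_equal_get_edit_distance_matrix := by
  intro s t _
  unfold Spec_get_edit_distance_matrix
  simp only [get_edit_distance_matrix, get_edit_distance_matrix_alt]
  -- B side = table of pvEd
  rw [pv_outer_fold s.toList t.toList (List.range (s.toList.length+1)) [] PySem.Dict.empty
      (pvInv_empty s.toList t.toList)]
  -- A side: first init loop
  have h1 := pv_init1 t.toList.length (s.toList.length+1) 0 [] rfl
  simp only [List.nil_append] at h1
  rw [List.range_eq_range', List.range_eq_range', h1]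
  -- second init loop
  rw [List.range'_succ, List.map_cons]
  have h2 := pv_init2 (t.toList.length+1) 0 []
      ((List.range' 1 s.toList.length).map (fun i : Nat => ((i : Int) :: List.replicate t.toList.length 0))) rfl
  simp only [List.nil_append, List.replicate_succ, Nat.cast_zero] at h2
  simp only [Nat.cast_zero, Nat.zero_add]
  rw [h2]
  -- main loops
  have h3 := pv_outer s.toList t.toList s.toList []
      ((List.range' 0 (t.toList.length+1)).map (fun j : Nat => (j : Int)))
      (by simp) (by simp)
  simp only [List.nil_append, List.length_nil, Nat.zero_add] at h3
  rw [h3]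
  -- identify A's rows with the pvEd table
  have hrow0 : (List.range' 0 (t.toList.length+1)).map (fun j : Nat => (j : Int))
      = (List.range (t.toList.length+1)).map (pvEd s.toList t.toList 0) := by
    rw [List.range_eq_range']
    exact List.map_congr_left (fun j _ => (pvEd_zero s.toList t.toList j).symm)
  rw [hrow0]
  have hb := pv_build_ed s.toList t.toList s.toList 0 (by simp)
  simp only [Nat.zero_add] at hb
  rw [hb, List.nil_append, List.range_eq_range']
  simp [List.range'_succ]
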